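-- pv_equiv track=rewrite | github.com/Dollyn-boy/PBL1-TabuleiroNumerico | tabuleiro_numerico.py | verificar_vertical
-- ===== SOURCE A (Python) =====
-- def verificar_vertical(matriz_tabuleiro, tamanho_tabuleiro):
--     for coluna in range(tamanho_tabuleiro):
--         valor_referencia = matriz_tabuleiro[0][coluna]
--         for linha in range(1, tamanho_tabuleiro):
--             if matriz_tabuleiro[linha][coluna] != valor_referencia + linha:
--                 break
--         else:
--             return True
--     return False
-- ===== SOURCE B (Python) =====
-- def verificar_vertical(matriz_tabuleiro, tamanho_tabuleiro):
--     # Row-major sweep: keep the set of candidate columns alive so far and,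
--     # for each row, discard the candidates whose entry breaks the +1 step
--     # from row 0.  A column survives all rows iff it is arithmetic.
--     candidatas = list(range(tamanho_tabuleiro))
--     for linha in range(1, tamanho_tabuleiro):
--         candidatas = [c for c in candidatas
--                       if matriz_tabuleiro[linha][c] == matriz_tabuleiro[0][c] + linha]
--     return len(candidatas) > 0
-- ===== Notes on version B (the rewrite author's own statement) =====
-- stated objective: alternative
-- what changed: Transposes the traversal: instead of scanning column by column with a break/else early return, B sweeps row by row maintaining the list of still-surviving candidate columns, filtering it at each row, and finally tests whether any candidate survived.
-- outside the precondition, e.g. on verificar_vertical([[1], [2]], 2): A returns True, B raises IndexError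
import Mathlib
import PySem

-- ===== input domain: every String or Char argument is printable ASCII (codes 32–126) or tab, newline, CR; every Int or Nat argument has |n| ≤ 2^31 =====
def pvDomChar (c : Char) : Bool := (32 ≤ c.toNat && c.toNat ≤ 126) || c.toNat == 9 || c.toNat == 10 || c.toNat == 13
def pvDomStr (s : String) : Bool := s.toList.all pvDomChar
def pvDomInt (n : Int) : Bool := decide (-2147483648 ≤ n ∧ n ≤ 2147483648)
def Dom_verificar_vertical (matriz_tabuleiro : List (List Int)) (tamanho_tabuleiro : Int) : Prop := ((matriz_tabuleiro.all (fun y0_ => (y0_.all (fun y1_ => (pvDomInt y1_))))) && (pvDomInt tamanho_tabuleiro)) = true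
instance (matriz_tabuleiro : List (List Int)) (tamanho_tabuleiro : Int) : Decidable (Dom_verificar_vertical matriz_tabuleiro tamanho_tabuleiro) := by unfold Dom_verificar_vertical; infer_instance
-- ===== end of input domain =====

-- B transposes the traversal: a row-by-row sweep filtering a list of surviving
-- candidate columns, instead of A's column-by-column scan with break/else
-- (objective: alternative, same cost).


-- ===== PORT A =====
def verificar_vertical (matriz_tabuleiro : List (List Int)) (tamanho_tabuleiro : Int) : Bool :=
  (PySem.List.pyRange 0 tamanho_tabuleiro 1).any (fun coluna =>
    let valor_referencia := PySem.List.pyGetD (PySem.List.pyGetD matriz_tabuleiro 0 []) coluna 0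
    (PySem.List.pyRange 1 tamanho_tabuleiro 1).all (fun linha =>
      PySem.List.pyGetD (PySem.List.pyGetD matriz_tabuleiro linha []) coluna 0 == valor_referencia + linha))

-- ===== PORT B =====
def verificar_vertical_alt (matriz_tabuleiro : List (List Int)) (tamanho_tabuleiro : Int) : Bool :=
  let candidatas := PySem.List.pyRange 0 tamanho_tabuleiro 1
  let candidatas := (PySem.List.pyRange 1 tamanho_tabuleiro 1).foldl (fun cand linha =>
    cand.filter (fun c =>
      PySem.List.pyGetD (PySem.List.pyGetD matriz_tabuleiro linha []) c 0 ==
        PySem.List.pyGetD (PySem.List.pyGetD matriz_tabuleiro 0 []) c 0 + linha)) candidatas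
  decide (0 < candidatas.length)

-- ===== PRECONDITION & SPEC =====
-- Pre_ excludes the inputs on which the Python A raises IndexError (fewer than
-- tamanho rows, or a row among the first tamanho with fewer than tamanho entries);
-- being a simple rectangular sufficient condition, it also excludes some ragged
-- matrices on which A happens to return early before reaching a missing entry
-- (B raises there too, just at a different cell).
def Pre_verificar_vertical (matriz_tabuleiro : List (List Int)) (tamanho_tabuleiro : Int) : Prop :=
  tamanho_tabuleiro ≤ 0 ∨
    (tamanho_tabuleiro ≤ (matriz_tabuleiro.length : Int) ∧
      ∀ row ∈ matriz_tabuleiro.take tamanho_tabuleiro.toNat, tamanho_tabuleiro ≤ (row.length : Int))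
instance (matriz_tabuleiro : List (List Int)) (tamanho_tabuleiro : Int) : Decidable (Pre_verificar_vertical matriz_tabuleiro tamanho_tabuleiro) := by unfold Pre_verificar_vertical; infer_instance
def pvWitness_verificar_vertical : List (List Int) × Int := ([[1, 5], [2, 7]], 2)
def Spec_verificar_vertical (matriz_tabuleiro : List (List Int)) (tamanho_tabuleiro : Int) (out : Bool) : Prop := out = verificar_vertical_alt matriz_tabuleiro tamanho_tabuleiro
instance (matriz_tabuleiro : List (List Int)) (tamanho_tabuleiro : Int) (out : Bool) : Decidable (Spec_verificar_vertical matriz_tabuleiro tamanho_tabuleiro out) := by unfold Spec_verificar_vertical; infer_instance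

-- ===== CLAIM (what is proved, stated in full; the proofs are below) =====
def Claim_equal_verificar_vertical : Prop := ∀ (matriz_tabuleiro : List (List Int)) (tamanho_tabuleiro : Int), Dom_verificar_vertical matriz_tabuleiro tamanho_tabuleiro → Pre_verificar_vertical matriz_tabuleiro tamanho_tabuleiro → Spec_verificar_vertical matriz_tabuleiro tamanho_tabuleiro (verificar_vertical matriz_tabuleiro tamanho_tabuleiro)

-- ===== LEMMAS AND PROOFS =====

-- folding the per-row filters over the rows = one filter by the conjunction over rows
lemma pv_foldl_filter (rows : List Int) (p : Int → Int → Bool) (init : List Int) :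
    rows.foldl (fun cand l => cand.filter (p l)) init
      = init.filter (fun c => rows.all (fun l => p l c)) := by
  induction rows generalizing init with
  | nil => simp
  | cons l t ih =>
      rw [List.foldl_cons, ih, List.filter_filter]
      apply List.filter_congr
      intro c _
      simp [Bool.and_comm]

-- a filtered list is nonempty iff some element satisfies the predicate
lemma pv_filter_pos (L : List Int) (f : Int → Bool) :
    decide (0 < (L.filter f).length) = L.any f := by
  rw [Bool.eq_iff_iff]
  simp only [decide_eq_true_eq, List.length_pos_iff, ne_eq, List.filter_eq_nil_iff,
    List.any_eq_true]
  push Not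
  simp

-- ===== VERDICT (by name: the statement is the Claim_ definition above) =====
theorem verificar_vertical_spec : Claim_equal_verificar_vertical := by
  intro m n _ _
  unfold Spec_verificar_vertical verificar_vertical verificar_vertical_alt
  dsimp only
  rw [pv_foldl_filter, pv_filter_pos]
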